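-- pv_equiv track=rewrite | github.com/richard-mck/adventofcode2023 | common_functions.py | parse_data_on_empty_rows
-- ===== SOURCE A (Python) =====
-- def parse_data_on_empty_rows(raw_data: list[str]) -> list[list[str]]:
--     """Given a list of strings demarcated by empty strings, break this into lists and return a list of lists"""
--     result = []
--     chunk = []
--     # Add an extra empty row for consistent handling
--     raw_data.append("")
--     for row in raw_data:
--         if len(row) == 0:
--             result.append(chunk)
--             chunk = []
--             continue
--         chunk.append(row)
--
--     return result
-- ===== SOURCE B (Python) =====
-- def parse_data_on_empty_rows(raw_data: list[str]) -> list[list[str]]: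
--     """Given a list of strings demarcated by empty strings, break this into lists and return a list of lists"""
--     # Same observable mutation as the original: append a trailing empty row.
--     raw_data.append("")
--     empties = [i for i, row in enumerate(raw_data) if len(row) == 0]
--     result = []
--     prev = 0
--     for e in empties:
--         result.append(raw_data[prev:e])
--         prev = e + 1
--     return result
-- ===== Notes on version B (the rewrite author's own statement) =====
-- stated objective: alternative
-- what changed: Replaces the single accumulate-and-flush chunk loop with a two-pass index scheme: first collect the positions of all empty rows, then slice the list between consecutive separator positions.
import Mathlib
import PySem

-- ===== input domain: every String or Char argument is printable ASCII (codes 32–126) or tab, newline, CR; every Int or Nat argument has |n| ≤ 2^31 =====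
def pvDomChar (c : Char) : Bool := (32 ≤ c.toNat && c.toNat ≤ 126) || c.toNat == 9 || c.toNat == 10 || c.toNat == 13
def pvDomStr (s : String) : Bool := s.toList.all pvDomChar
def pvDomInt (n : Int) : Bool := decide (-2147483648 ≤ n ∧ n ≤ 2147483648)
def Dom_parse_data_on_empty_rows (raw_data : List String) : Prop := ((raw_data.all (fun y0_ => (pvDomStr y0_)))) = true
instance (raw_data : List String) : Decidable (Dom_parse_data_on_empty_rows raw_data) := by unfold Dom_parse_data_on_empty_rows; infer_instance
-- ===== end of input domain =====

-- B replaces the accumulate-and-flush loop by a two-pass scheme (collect separator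
-- indices, then slice between them); equivalence is about the return value — both
-- Pythons also append "" to the argument list in place.

-- ===== PORT A =====
def parse_data_on_empty_rows (raw_data : List String) : List (List String) :=
  let data := raw_data ++ [""]
  (data.foldl
    (fun (st : List (List String) × List String) row =>
      if PySem.Str.len row = 0 then (st.1 ++ [st.2], [])
      else (st.1, st.2 ++ [row]))
    ([], [])).1

-- ===== PORT B =====
def parse_data_on_empty_rows_alt (raw_data : List String) : List (List String) :=
  let data := raw_data ++ [""]
  let empties : List Int :=
    ((PySem.List.enumerate data).filter (fun p => PySem.Str.len p.2 = 0)).map (·.1)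
  (empties.foldl
    (fun (st : List (List String) × Int) e =>
      (st.1 ++ [PySem.List.slice data (some st.2) (some e)], e + 1))
    ([], 0)).1

-- ===== PRECONDITION & SPEC =====
def Spec_parse_data_on_empty_rows (raw_data : List String) (out : List (List String)) : Prop := out = parse_data_on_empty_rows_alt raw_data
instance (raw_data : List String) (out : List (List String)) : Decidable (Spec_parse_data_on_empty_rows raw_data out) := by unfold Spec_parse_data_on_empty_rows; infer_instance

-- ===== CLAIM (what is proved, stated in full; the proofs are below) =====
def Claim_equal_parse_data_on_empty_rows : Prop := ∀ (raw_data : List String), Dom_parse_data_on_empty_rows raw_data → Spec_parse_data_on_empty_rows raw_data (parse_data_on_empty_rows raw_data)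

-- ===== LEMMAS AND PROOFS =====

/-- Reference splitter: flush the chunk at each empty row, drop the leftover. -/
def pvChunks : List String → List String → List (List String)
  | [], _ => []
  | r :: t, c => if PySem.Str.len r = 0 then c :: pvChunks t [] else pvChunks t (c ++ [r])

theorem pvA_eq (data : List String) (acc : List (List String)) (c : List String) :
    (data.foldl
      (fun (st : List (List String) × List String) row =>
        if PySem.Str.len row = 0 then (st.1 ++ [st.2], [])
        else (st.1, st.2 ++ [row]))
      (acc, c)).1 = acc ++ pvChunks data c := by
  induction data generalizing acc c with
  | nil => simp [pvChunks]
  | cons r t ih =>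
    by_cases h : r = ""
    · have hc0 : PySem.Str.len r = 0 := by simp [h]
      simp only [List.foldl_cons]
      rw [if_pos hc0, ih]
      simp [pvChunks, h]
    · have hc0 : ¬ PySem.Str.len r = 0 := by simp [h]
      simp only [List.foldl_cons]
      rw [if_neg hc0, ih]
      simp [pvChunks, h]

theorem pvB_eq (data full : List String) (off prev : Nat) (acc : List (List String))
    (c : List String) (hfull : full.drop off = data) (hle : prev ≤ off)
    (hc : (full.drop prev).take (off - prev) = c) :
    ((((PySem.List.enumerate data (off : Int)).filter
        (fun p => PySem.Str.len p.2 = 0)).map (·.1)).foldl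
      (fun (st : List (List String) × Int) e =>
        (st.1 ++ [PySem.List.slice full (some st.2) (some e)], e + 1))
      (acc, (prev : Nat))).1 = acc ++ pvChunks data c := by
  induction data generalizing off prev acc c with
  | nil => simp [PySem.List.enumerate_nil, pvChunks]
  | cons r t ih =>
    have hdrop : full.drop (off + 1) = t := by
      have := congrArg List.tail hfull
      simpa [List.tail_drop] using this
    have hget : full[off]? = some r := by
      have := congrArg (·[0]?) hfull
      simpa [List.getElem?_drop] using this
    have hofflt : off < full.length := by
      by_contra h
      simp [List.getElem?_eq_none (by omega : full.length ≤ off)] at hget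
    rw [PySem.List.enumerate_cons]
    simp only [List.filter_cons]
    by_cases h : r = ""
    · -- empty row: flush slice full[prev:off]
      have hflt : decide (PySem.Str.len r = 0) = true := by simp [h]
      simp only [hflt, if_pos, List.map_cons, List.foldl_cons]
      have hslice : PySem.List.slice full (some ((prev : Nat) : Int)) (some (off : Int)) = c := by
        rw [PySem.List.slice_natCast]; exact hc
      have : ((off : Int) + 1) = ((off + 1 : Nat) : Int) := by push_cast; ring
      rw [hslice, this]
      rw [ih (off + 1) (off + 1) (acc ++ [c]) [] hdrop (le_refl _) (by simp)]
      simp [pvChunks, h]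
    · -- nonempty row: extend the chunk
      have hflt : decide (PySem.Str.len r = 0) = false := by simp [h]
      simp only [hflt, Bool.false_eq_true, if_false]
      have : ((off : Int) + 1) = ((off + 1 : Nat) : Int) := by push_cast; ring
      rw [this, ih (off + 1) prev acc (c ++ [r]) hdrop (by omega)]
      · simp [pvChunks, h]
      · rw [← hc]
        have hlen : off - prev < (full.drop prev).length := by
          simp [List.length_drop]; omega
        rw [(by omega : off + 1 - prev = (off - prev) + 1),
          List.take_add_one, List.getElem?_drop,
          (by omega : prev + (off - prev) = off), hget]
        simp

-- ===== VERDICT (by name: the statement is the Claim_ definition above) =====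
theorem parse_data_on_empty_rows_spec : Claim_equal_parse_data_on_empty_rows := by
  intro raw_data _
  unfold Spec_parse_data_on_empty_rows parse_data_on_empty_rows parse_data_on_empty_rows_alt
  simp only []
  rw [pvA_eq]
  have h := pvB_eq (raw_data ++ [""]) (raw_data ++ [""]) 0 0 [] [] (by simp) (le_refl _) (by simp)
  simp only [Nat.cast_zero] at h
  exact h.symm
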